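-- pv_equiv track=rewrite | github.com/Qjordnvb/pythonDatalayerAutomation | src/validator/datalayer_validator.py | _sort_reference_properties
-- ===== SOURCE A (Python) =====
-- from typing import Dict, List, Any, Tuple, Optional
--
-- def _sort_reference_properties(
--     captured_datalayer: Dict[str, Any], reference_properties: Dict[str, Any]
-- ) -> Dict[str, Any]:
--     """
--     Ordena las propiedades del DataLayer de referencia en el mismo orden que
--     las propiedades del DataLayer capturado para facilitar la comparación.
--
--     Args:
--        captured_datalayer: DataLayer capturado
--        reference_properties: Propiedades del DataLayer de referencia
--
--     Returns:
--        Diccionario de propiedades de referencia ordenadas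
--     """
--     # Si alguno de los argumentos no es un diccionario, devolver el de referencia sin cambios
--     if not isinstance(captured_datalayer, dict) or not isinstance(
--         reference_properties, dict
--     ):
--         return reference_properties
--
--     # Crear un nuevo diccionario para las propiedades ordenadas
--     sorted_properties = {}
--
--     # Primero, incluir todas las propiedades que están en el DataLayer capturado
--     # en el mismo orden
--     for key in captured_datalayer.keys():
--         if key in reference_properties:
--             sorted_properties[key] = reference_properties[key]
--
--     # Luego, incluir cualquier propiedad restante del DataLayer de referencia que no
--     # esté en el capturado
--     for key, value in reference_properties.items():
--         if key not in sorted_properties: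
--             sorted_properties[key] = value
--
--     return sorted_properties
-- ===== SOURCE B (Python) =====
-- def _sort_reference_properties(captured_datalayer, reference_properties):
--     if not isinstance(captured_datalayer, dict) or not isinstance(
--         reference_properties, dict
--     ):
--         return reference_properties
--     captured_index = {k: i for i, k in enumerate(captured_datalayer)}
--     n = len(captured_datalayer)
--     ordered = sorted(
--         enumerate(reference_properties.items()),
--         key=lambda t: captured_index.get(t[1][0], n + t[0]),
--     )
--     return {k: v for _, (k, v) in ordered}
-- ===== Notes on version B (the rewrite author's own statement) =====
-- stated objective: alternative
-- what changed: Replaces A's two sequential filtering loops (captured-order pass, then leftover-reference pass) by a single sort of the enumerated reference items keyed by each key's position in the captured dict, with len(captured)+original-position as fallback for unmatched keys.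
import Mathlib
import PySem

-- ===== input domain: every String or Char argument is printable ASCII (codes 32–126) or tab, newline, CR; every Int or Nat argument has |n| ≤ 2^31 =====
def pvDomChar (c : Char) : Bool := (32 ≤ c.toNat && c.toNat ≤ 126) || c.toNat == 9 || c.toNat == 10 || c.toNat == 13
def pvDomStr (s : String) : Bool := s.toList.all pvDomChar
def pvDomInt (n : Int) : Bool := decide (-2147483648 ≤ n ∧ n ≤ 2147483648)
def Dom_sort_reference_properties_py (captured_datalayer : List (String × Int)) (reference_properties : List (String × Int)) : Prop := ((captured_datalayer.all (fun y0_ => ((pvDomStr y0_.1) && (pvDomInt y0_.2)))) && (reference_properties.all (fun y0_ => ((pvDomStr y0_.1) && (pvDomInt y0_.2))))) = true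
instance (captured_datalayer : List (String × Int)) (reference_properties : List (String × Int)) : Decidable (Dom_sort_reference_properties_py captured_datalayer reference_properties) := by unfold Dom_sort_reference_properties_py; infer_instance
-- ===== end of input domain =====

-- B reorders the reference items with ONE stable-style sort keyed by each key's position in the
-- captured dict (missing keys fall back to len(captured)+original position), replacing A's two
-- sequential filtering loops; objective: alternative (same asymptotic cost, different algorithm).


-- ===== PORT A =====
-- The isinstance guard of the Python never fires under the type convention (both arguments are
-- dicts), so it is not ported.  Each dict argument is marshalled with PySem.Dict.ofList (exact
-- Python dict construction: first position kept, last value wins).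
def sort_reference_properties_py (captured_datalayer : List (String × Int)) (reference_properties : List (String × Int)) : List (String × Int) :=
  let cd := PySem.Dict.ofList captured_datalayer
  let rd := PySem.Dict.ofList reference_properties
  -- for key in captured_datalayer.keys(): if key in reference_properties: sorted[key] = reference[key]
  let s1 := cd.keys.foldl (fun d k =>
      match rd.get? k with
      | some v => d.insert k v
      | none => d) PySem.Dict.empty
  -- for key, value in reference_properties.items(): if key not in sorted: sorted[key] = value
  let s2 := rd.items.foldl (fun d kv =>
      if d.contains kv.1 then d else d.insert kv.1 kv.2) s1
  s2.items

-- ===== PORT B =====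
def sort_reference_properties_py_alt (captured_datalayer : List (String × Int)) (reference_properties : List (String × Int)) : List (String × Int) :=
  let cd := PySem.Dict.ofList captured_datalayer
  let rd := PySem.Dict.ofList reference_properties
  -- captured_index = {k: i for i, k in enumerate(captured_datalayer)}
  let captured_index := PySem.Dict.ofList ((PySem.List.enumerate cd.keys).map (fun p => (p.2, p.1)))
  -- n = len(captured_datalayer)
  let n : Int := cd.size
  -- ordered = sorted(enumerate(reference_properties.items()), key=lambda t: captured_index.get(t[1][0], n + t[0]))
  let ordered := PySem.List.sorted (PySem.List.enumerate rd.items)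
      (fun t => captured_index.getD t.2.1 (n + t.1)) false
  -- {k: v for _, (k, v) in ordered}
  (PySem.Dict.ofList (ordered.map (fun t => t.2))).items

-- ===== PRECONDITION & SPEC =====
def Spec_sort_reference_properties_py (captured_datalayer : List (String × Int)) (reference_properties : List (String × Int)) (out : List (String × Int)) : Prop := out = sort_reference_properties_py_alt captured_datalayer reference_properties
instance (captured_datalayer : List (String × Int)) (reference_properties : List (String × Int)) (out : List (String × Int)) : Decidable (Spec_sort_reference_properties_py captured_datalayer reference_properties out) := by unfold Spec_sort_reference_properties_py; infer_instance

-- ===== CLAIM (what is proved, stated in full; the proofs are below) =====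
def Claim_equal_sort_reference_properties_py : Prop := ∀ (captured_datalayer : List (String × Int)) (reference_properties : List (String × Int)), Dom_sort_reference_properties_py captured_datalayer reference_properties → Spec_sort_reference_properties_py captured_datalayer reference_properties (sort_reference_properties_py captured_datalayer reference_properties)

-- ===== LEMMAS AND PROOFS =====

theorem pv_items_ofList_of_nodup {κ ν : Type} [BEq κ] [LawfulBEq κ] (ps : List (κ × ν))
    (h : (ps.map Prod.fst).Nodup) : (PySem.Dict.ofList ps).items = ps := by
  have h1 : ∀ a ∈ ps, (PySem.Dict.empty : PySem.Dict κ ν).contains a.1 = false := by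
    intro a _; simp [PySem.Dict.contains_empty]
  have h2 := PySem.Dict.items_foldl_insert_fresh ps Prod.fst Prod.snd PySem.Dict.empty h1 h
  simpa [PySem.Dict.ofList, PySem.Dict.update, PySem.Dict.empty] using h2

theorem pv_swap_enum_keys (C : List String) :
    ((PySem.List.enumerate C).map (fun p => (p.2, p.1))).map Prod.fst = C := by
  rw [List.map_map]
  have h : (Prod.fst ∘ fun p : Int × String => (p.2, p.1)) = fun p : Int × String => p.2 := rfl
  rw [h, PySem.List.map_snd_enumerate]

theorem pv_idx_getD_getElem (C : List String) (hC : C.Nodup) (j : Nat) (hj : j < C.length) (d : Int) :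
    (PySem.Dict.ofList ((PySem.List.enumerate C).map (fun p => (p.2, p.1)))).getD C[j] d = j := by
  have hnd : (((PySem.List.enumerate C).map (fun p => (p.2, p.1))).map Prod.fst).Nodup := by
    rw [pv_swap_enum_keys]; exact hC
  have hit := pv_items_ofList_of_nodup _ hnd
  have hmem : ((j : Int), C[j]) ∈ PySem.List.enumerate C := by
    rw [PySem.List.mem_enumerate_iff]
    exact ⟨j, hj, by simp⟩
  have hmem2 : (C[j], (j : Int)) ∈ (PySem.Dict.ofList ((PySem.List.enumerate C).map (fun p => (p.2, p.1)))).items := by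
    rw [hit]
    exact List.mem_map_of_mem hmem
  exact PySem.Dict.getD_of_mem_items _ hmem2 (PySem.Dict.nodup_keys_ofList _) d

theorem pv_idx_getD_not_mem (C : List String) (hC : C.Nodup) (k : String) (hk : k ∉ C) (d : Int) :
    (PySem.Dict.ofList ((PySem.List.enumerate C).map (fun p => (p.2, p.1)))).getD k d = d := by
  have hnd : (((PySem.List.enumerate C).map (fun p => (p.2, p.1))).map Prod.fst).Nodup := by
    rw [pv_swap_enum_keys]; exact hC
  apply PySem.Dict.getD_of_not_contains
  rw [← Bool.not_eq_true, PySem.Dict.contains_iff_mem_keys]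
  intro hmem
  apply hk
  have hkeys : (PySem.Dict.ofList ((PySem.List.enumerate C).map (fun p => (p.2, p.1)))).keys
      = ((PySem.Dict.ofList ((PySem.List.enumerate C).map (fun p => (p.2, p.1)))).items).map (fun x => x.1) := rfl
  rw [hkeys, pv_items_ofList_of_nodup _ hnd] at hmem
  have : ((PySem.List.enumerate C).map (fun p : Int × String => (p.2, p.1))).map (fun x => x.1)
      = ((PySem.List.enumerate C).map (fun p : Int × String => (p.2, p.1))).map Prod.fst := rfl
  rw [this, pv_swap_enum_keys] at hmem
  exact hmem

theorem pv_loop1_items (C : List String) (rd : PySem.Dict String Int) (hC : C.Nodup) :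
    (C.foldl (fun d k =>
      match rd.get? k with
      | some v => d.insert k v
      | none => d) PySem.Dict.empty).items
    = (C.filter (fun k => rd.contains k)).map (fun k => (k, rd.getD k 0)) := by
  have hstep : ∀ k ∈ C, ∀ d : PySem.Dict String Int,
      (match rd.get? k with
       | some v => d.insert k v
       | none => d)
      = if rd.contains k then d.insert k (rd.getD k 0) else d := by
    intro k _ d
    cases h : rd.get? k with
    | none =>
        rw [PySem.Dict.contains_eq_isSome_get?, h]; simp
    | some v =>
        rw [PySem.Dict.contains_eq_isSome_get?, h, PySem.Dict.getD_of_get?_eq_some rd 0 h]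
        simp
  rw [PySem.List.foldl_congr_mem' C _ _ _ hstep, ← List.foldl_filter]
  have hfresh : ∀ k ∈ C.filter (fun k => rd.contains k),
      (PySem.Dict.empty : PySem.Dict String Int).contains (id k) = false := by
    intro k _; simp [PySem.Dict.contains_empty]
  have hnd : ((C.filter (fun k => rd.contains k)).map id).Nodup := by
    simpa using hC.filter _
  have h2 := PySem.Dict.items_foldl_insert_fresh (C.filter (fun k => rd.contains k))
      id (fun k => rd.getD k 0) PySem.Dict.empty hfresh hnd
  simpa [PySem.Dict.empty] using h2

theorem pv_loop2_items (R : List (String × Int)) (d : PySem.Dict String Int)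
    (hR : (R.map Prod.fst).Nodup) :
    (R.foldl (fun d kv => if d.contains kv.1 then d else d.insert kv.1 kv.2) d).items
    = d.items ++ R.filter (fun kv => !(d.contains kv.1)) := by
  induction R generalizing d with
  | nil => simp
  | cons kv rest ih =>
      simp only [List.map_cons, List.nodup_cons] at hR
      obtain ⟨hkv, hrest⟩ := hR
      by_cases h : d.contains kv.1 = true
      · rw [List.foldl_cons, if_pos h, ih d hrest, List.filter_cons]
        simp [h]
      · have hf : d.contains kv.1 = false := by simpa using h
        rw [List.foldl_cons, if_neg h, ih _ hrest,
          PySem.Dict.items_insert_of_not_contains d kv.2 hf]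
        have hfil : rest.filter (fun kv' => !((d.insert kv.1 kv.2).contains kv'.1))
            = rest.filter (fun kv' => !(d.contains kv'.1)) := by
          apply List.filter_congr
          intro kv' hkv'
          have hne : kv'.1 ≠ kv.1 := by
            intro he
            exact hkv (he ▸ List.mem_map_of_mem hkv')
          rw [PySem.Dict.contains_insert]
          simp [hne]
        rw [hfil, List.filter_cons]
        simp [hf]

theorem pv_enum_pair_keys (R : List (String × Int)) :
    (PySem.List.enumerate R).map (fun t => t.2.1) = R.map Prod.fst := by
  have h : (PySem.List.enumerate R).map (fun t => t.2.1)
      = ((PySem.List.enumerate R).map (fun t => t.2)).map Prod.fst := by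
    rw [List.map_map]; rfl
  rw [h, PySem.List.map_snd_enumerate]

theorem pv_enum_nodup (R : List (String × Int)) : (PySem.List.enumerate R).Nodup := by
  have h := PySem.List.pairwise_lt_enumerate R 0
  exact h.imp (fun h' => by intro he; subst he; omega)

theorem pv_find?_eq_some (R : List (String × Int)) (hR : (R.map Prod.fst).Nodup)
    (t : Int × (String × Int)) (ht : t ∈ PySem.List.enumerate R) :
    (PySem.List.enumerate R).find? (fun u => u.2.1 == t.2.1) = some t := by
  have hkeys : ((PySem.List.enumerate R).map (fun u => u.2.1)).Nodup := by
    rw [pv_enum_pair_keys]; exact hR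
  have hs : ((PySem.List.enumerate R).find? (fun u => u.2.1 == t.2.1)).isSome := by
    rw [List.find?_isSome]; exact ⟨t, ht, by simp⟩
  obtain ⟨t', ht'⟩ := Option.isSome_iff_exists.mp hs
  have hmem := List.mem_of_find?_eq_some ht'
  have hpred := List.find?_some ht'
  have : t' = t := by
    apply List.inj_on_of_nodup_map hkeys hmem ht
    simpa using hpred
  rw [ht', this]

theorem pv_find?_eq_none (R : List (String × Int)) (k : String)
    (hk : k ∉ R.map Prod.fst) :
    (PySem.List.enumerate R).find? (fun u => u.2.1 == k) = none := by
  rw [List.find?_eq_none]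
  intro t ht hp
  apply hk
  rw [← pv_enum_pair_keys]
  have : t.2.1 = k := by simpa using hp
  exact this ▸ List.mem_map_of_mem ht

theorem pv_filter_map_eq_filterMap {α β : Type} (l : List α) (p : α → Bool) (f : α → β) :
    (l.filter p).map f = l.filterMap (fun a => if p a then some (f a) else none) := by
  induction l with
  | nil => rfl
  | cons x t ih => by_cases h : p x <;> simp [h, ih]

theorem pv_central (C : List String) (R : List (String × Int)) (hC : C.Nodup)
    (hR : (R.map Prod.fst).Nodup) :
    PySem.List.sorted (PySem.List.enumerate R)
      (fun t => (PySem.Dict.ofList ((PySem.List.enumerate C).map (fun p => (p.2, p.1)))).getD t.2.1 ((C.length : Int) + t.1)) false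
    = C.filterMap (fun k => (PySem.List.enumerate R).find? (fun t => t.2.1 == k))
      ++ (PySem.List.enumerate R).filter (fun t => !decide (t.2.1 ∈ C)) := by
  set idx := PySem.Dict.ofList ((PySem.List.enumerate C).map (fun p => (p.2, p.1))) with hidx
  set E := PySem.List.enumerate R with hE
  set key : Int × (String × Int) → Int := fun t => idx.getD t.2.1 ((C.length : Int) + t.1) with hkey
  set P1 := C.filterMap (fun k => E.find? (fun t => t.2.1 == k)) with hP1
  set P2 := E.filter (fun t => !decide (t.2.1 ∈ C)) with hP2
  have hEnodup := pv_enum_nodup R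
  have hEkeys : (E.map (fun t => t.2.1)).Nodup := by
    rw [hE, pv_enum_pair_keys]; exact hR
  -- membership in P1
  have hmemP1 : ∀ t, t ∈ P1 ↔ t ∈ E ∧ t.2.1 ∈ C := by
    intro t
    constructor
    · intro h
      rw [hP1, List.mem_filterMap] at h
      obtain ⟨k, hkC, hfind⟩ := h
      have hmem := List.mem_of_find?_eq_some hfind
      have hpred : t.2.1 = k := by simpa using List.find?_some hfind
      exact ⟨hmem, hpred ▸ hkC⟩
    · rintro ⟨htE, htC⟩
      rw [hP1, List.mem_filterMap]
      exact ⟨t.2.1, htC, pv_find?_eq_some R hR t htE⟩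
  -- key values
  have hkeyP1 : ∀ t ∈ P1, ∀ (j : Nat) (hj : j < C.length), C[j]'hj = t.2.1 → key t = j := by
    intro t _ j hj hCj
    rw [hkey]
    simp only []
    rw [← hCj, hidx, pv_idx_getD_getElem C hC j hj]
  have hkeyP2 : ∀ t ∈ P2, key t = (C.length : Int) + t.1 := by
    intro t ht
    rw [hP2, List.mem_filter] at ht
    have : t.2.1 ∉ C := by simpa using ht.2
    rw [hkey]
    simp only []
    rw [hidx, pv_idx_getD_not_mem C hC _ this]
  -- nodups
  have hP1nodup : P1.Nodup := by
    rw [hP1]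
    apply List.Nodup.filterMap _ hC
    intro a a' b hb hb'
    have h1 : b.2.1 = a := by simpa using List.find?_some hb
    have h2 : b.2.1 = a' := by simpa using List.find?_some hb'
    rw [← h1, ← h2]
  have hP2nodup : P2.Nodup := hEnodup.filter _
  have hdisj : P1.Disjoint P2 := by
    intro t ht1 ht2
    have h1 := ((hmemP1 t).mp ht1).2
    rw [hP2, List.mem_filter] at ht2
    have h2 : t.2.1 ∉ C := by simpa using ht2.2
    exact h2 h1
  -- permutation
  have hperm : (P1 ++ P2).Perm E := by
    rw [List.perm_ext_iff_of_nodup (hP1nodup.append hP2nodup hdisj) hEnodup]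
    intro t
    rw [List.mem_append, hmemP1, hP2, List.mem_filter]
    constructor
    · rintro (⟨h, _⟩ | ⟨h, _⟩) <;> exact h
    · intro h
      by_cases hc : t.2.1 ∈ C
      · exact Or.inl ⟨h, hc⟩
      · exact Or.inr ⟨h, by simpa using hc⟩
  -- pairwise
  have hpair : (P1 ++ P2).Pairwise (fun a b => key a < key b) := by
    rw [List.pairwise_append]
    refine ⟨?_, ?_, ?_⟩
    · -- within P1
      rw [hP1, List.pairwise_filterMap]
      rw [List.pairwise_iff_getElem]
      intro i j hi hj hij b hb b' hb'
      have hbi : b.2.1 = C[i] := by simpa using List.find?_some hb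
      have hbj : b'.2.1 = C[j] := by simpa using List.find?_some hb'
      have hbP1 : b ∈ P1 := by
        rw [hP1, List.mem_filterMap]
        exact ⟨C[i], List.getElem_mem hi, hb⟩
      have hbP1' : b' ∈ P1 := by
        rw [hP1, List.mem_filterMap]
        exact ⟨C[j], List.getElem_mem hj, hb'⟩
      rw [hkeyP1 b hbP1 i hi hbi.symm, hkeyP1 b' hbP1' j hj hbj.symm]
      exact_mod_cast hij
    · -- within P2
      have hp := (PySem.List.pairwise_lt_enumerate R 0).filter (fun t => !decide (t.2.1 ∈ C))
      have : P2.Pairwise (fun p q => p.1 < q.1) := hp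
      apply List.Pairwise.imp_of_mem _ this
      intro p q hp' hq' hlt
      rw [hkeyP2 p hp', hkeyP2 q hq']
      omega
    · -- cross
      intro p hp q hq
      have hpC := ((hmemP1 p).mp hp).2
      obtain ⟨j, hj, hCj⟩ := List.mem_iff_getElem.mp hpC
      rw [hkeyP1 p hp j hj hCj, hkeyP2 q hq]
      have hq0 : 0 ≤ q.1 := by
        rw [hP2, List.mem_filter] at hq
        obtain ⟨k, hk, rfl⟩ := (PySem.List.mem_enumerate_iff R 0 q).mp hq.1
        simp
      omega
  exact PySem.List.sorted_eq_of_perm_of_pairwise_lt E (P1 ++ P2) key hperm hpair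

theorem pv_main (c r : List (String × Int)) :
    sort_reference_properties_py c r = sort_reference_properties_py_alt c r := by
  unfold sort_reference_properties_py sort_reference_properties_py_alt
  set cd := PySem.Dict.ofList c with hcd
  set rd := PySem.Dict.ofList r with hrd
  set C := cd.keys with hCdef
  set R := rd.items with hRdef
  have hC : C.Nodup := PySem.Dict.nodup_keys_ofList c
  have hRk : (R.map Prod.fst).Nodup := by
    have := PySem.Dict.nodup_keys_ofList r
    simpa [PySem.Dict.keys] using this
  have hrdkeys : rd.keys = R.map Prod.fst := rfl
  -- ===== A side =====
  set s1 := C.foldl (fun d k =>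
      match rd.get? k with
      | some v => d.insert k v
      | none => d) PySem.Dict.empty with hs1
  have hs1items : s1.items = (C.filter (fun k => rd.contains k)).map (fun k => (k, rd.getD k 0)) :=
    pv_loop1_items C rd hC
  have hs1keys : s1.keys = C.filter (fun k => rd.contains k) := by
    show s1.items.map (fun x => x.1) = _
    rw [hs1items, List.map_map]
    rw [show ((fun x : String × Int => x.1) ∘ fun k : String => (k, rd.getD k 0)) = id from rfl, List.map_id]
  have hAfil : R.filter (fun kv => !(s1.contains kv.1)) = R.filter (fun kv => !decide (kv.1 ∈ C)) := by
    apply List.filter_congr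
    intro kv hkv
    have hrdc : rd.contains kv.1 = true := by
      rw [PySem.Dict.contains_iff_mem_keys, hrdkeys]
      exact List.mem_map_of_mem hkv
    by_cases hc : kv.1 ∈ C
    · have : s1.contains kv.1 = true := by
        rw [PySem.Dict.contains_iff_mem_keys, hs1keys, List.mem_filter]
        exact ⟨hc, hrdc⟩
      simp [this, hc]
    · have : s1.contains kv.1 = false := by
        rw [← Bool.not_eq_true, PySem.Dict.contains_iff_mem_keys, hs1keys, List.mem_filter]
        intro h; exact hc h.1
      simp [this, hc]
  have hA : (R.foldl (fun d kv => if d.contains kv.1 then d else d.insert kv.1 kv.2) s1).items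
      = (C.filter (fun k => rd.contains k)).map (fun k => (k, rd.getD k 0))
        ++ R.filter (fun kv => !decide (kv.1 ∈ C)) := by
    rw [pv_loop2_items R s1 hRk, hs1items, hAfil]
  -- ===== B side =====
  have hn : ((cd.size : Nat) : Int) = (C.length : Int) := by
    have : C.length = cd.size := by
      rw [hCdef]; exact List.length_map ..
    rw [this]
  set P1 := C.filterMap (fun k => (PySem.List.enumerate R).find? (fun t => t.2.1 == k)) with hP1
  set P2 := (PySem.List.enumerate R).filter (fun t => !decide (t.2.1 ∈ C)) with hP2
  have hsorted : PySem.List.sorted (PySem.List.enumerate R)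
      (fun t => (PySem.Dict.ofList ((PySem.List.enumerate C).map (fun p => (p.2, p.1)))).getD t.2.1 ((cd.size : Int) + t.1)) false
      = P1 ++ P2 := by
    have := pv_central C R hC hRk
    rw [← hn] at this
    exact this
  -- existence of an enumerate element for every present key
  have hexists : ∀ k, k ∈ R.map Prod.fst → ∃ t ∈ PySem.List.enumerate R, t.2.1 = k := by
    intro k hk
    obtain ⟨kv, hkv, rfl⟩ := List.mem_map.mp hk
    have : kv ∈ (PySem.List.enumerate R).map (fun t => t.2) := by
      rw [PySem.List.map_snd_enumerate]; exact hkv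
    obtain ⟨t, ht, rfl⟩ := List.mem_map.mp this
    exact ⟨t, ht, rfl⟩
  -- values of P1
  have hP1val : P1.map (fun t => t.2)
      = (C.filter (fun k => rd.contains k)).map (fun k => (k, rd.getD k 0)) := by
    rw [hP1, List.map_filterMap, pv_filter_map_eq_filterMap]
    apply List.filterMap_congr
    intro k _
    by_cases hk : rd.contains k = true
    · have hkR : k ∈ R.map Prod.fst := by rw [← hrdkeys]; exact (PySem.Dict.contains_iff_mem_keys rd k).mp hk
      obtain ⟨t, ht, htk⟩ := hexists k hkR
      have hfind := pv_find?_eq_some R hRk t ht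
      rw [htk] at hfind
      rw [hfind]
      have ht2 : t.2 ∈ R := by
        rw [← PySem.List.map_snd_enumerate R 0]
        exact List.mem_map_of_mem ht
      have hgd : rd.getD k 0 = t.2.2 := by
        apply PySem.Dict.getD_of_mem_items
        · rw [← htk]; exact ht2
        · rw [hrdkeys]; exact hRk
      rw [Option.map_some, if_pos hk, hgd, ← htk]
    · have hkR : k ∉ R.map Prod.fst := by
        rw [← hrdkeys]; intro h; exact hk ((PySem.Dict.contains_iff_mem_keys rd k).mpr h)
      rw [pv_find?_eq_none R k hkR]
      simp [hk]
  -- values of P2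
  have hP2val : P2.map (fun t => t.2) = R.filter (fun kv => !decide (kv.1 ∈ C)) := by
    have hcomp : P2 = (PySem.List.enumerate R).filter ((fun kv : String × Int => !decide (kv.1 ∈ C)) ∘ (fun t : Int × (String × Int) => t.2)) := rfl
    rw [hcomp, ← List.filter_map, PySem.List.map_snd_enumerate]
  -- keys of the concatenation are distinct
  have hndB : (((P1 ++ P2).map (fun t => t.2)).map Prod.fst).Nodup := by
    rw [List.map_append, hP1val, hP2val, List.map_append, List.map_map]
    rw [show (Prod.fst ∘ fun k : String => (k, rd.getD k 0)) = id from rfl, List.map_id]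
    apply List.Nodup.append
    · exact hC.filter _
    · exact ((List.filter_sublist).map Prod.fst).nodup hRk
    · intro k hk1 hk2
      have hkC : k ∈ C := (List.mem_filter.mp hk1).1
      obtain ⟨kv, hkv, rfl⟩ := List.mem_map.mp hk2
      have := (List.mem_filter.mp hkv).2
      simp at this
      exact this hkC
  calc (R.foldl (fun d kv => if d.contains kv.1 then d else d.insert kv.1 kv.2) s1).items
      = (C.filter (fun k => rd.contains k)).map (fun k => (k, rd.getD k 0))
        ++ R.filter (fun kv => !decide (kv.1 ∈ C)) := hA
    _ = (P1 ++ P2).map (fun t => t.2) := by rw [List.map_append, hP1val, hP2val]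
    _ = (PySem.Dict.ofList ((P1 ++ P2).map (fun t => t.2))).items := (pv_items_ofList_of_nodup _ hndB).symm
    _ = _ := by rw [← hsorted]

-- ===== VERDICT (by name: the statement is the Claim_ definition above) =====
theorem sort_reference_properties_py_spec : Claim_equal_sort_reference_properties_py := by
  intro captured_datalayer reference_properties _
  exact pv_main captured_datalayer reference_properties
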